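-- pv_equiv track=rewrite | github.com/vjsingh1984/victor | victor/tools/output_pruner.py | _is_code_file
-- ===== SOURCE A (Python) =====
-- def _is_code_file(output: str) -> bool:
--     """Heuristic to detect if output is code."""
--     # Check for common code patterns
--     code_indicators = [
--         "def ",  # Python functions
--         "class ",  # Python classes
--         "import ",
--         "from ",
--         "function ",  # JavaScript
--         "const ",  # JavaScript
--         "=>",  # Arrow functions
--     ]
--     output_lower = output.lower()
--     return any(indicator in output_lower for indicator in code_indicators)
-- ===== SOURCE B (Python) =====
-- _INDICATORS = ("def ", "class ", "import ", "from ", "function ", "const ", "=>")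
--
-- def _is_code_file(output: str) -> bool:
--     """Heuristic to detect if output is code (single left-to-right scan)."""
--     s = output.lower()
--     for i in range(len(s)):
--         if s.startswith(_INDICATORS, i):
--             return True
--     return False
-- ===== Notes on version B (the rewrite author's own statement) =====
-- stated objective: alternative
-- what changed: Replaces seven independent substring-containment scans with one left-to-right scan that at each position tests whether any indicator starts there (a single-pass multi-pattern matcher via str.startswith with a tuple).
import Mathlib
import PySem

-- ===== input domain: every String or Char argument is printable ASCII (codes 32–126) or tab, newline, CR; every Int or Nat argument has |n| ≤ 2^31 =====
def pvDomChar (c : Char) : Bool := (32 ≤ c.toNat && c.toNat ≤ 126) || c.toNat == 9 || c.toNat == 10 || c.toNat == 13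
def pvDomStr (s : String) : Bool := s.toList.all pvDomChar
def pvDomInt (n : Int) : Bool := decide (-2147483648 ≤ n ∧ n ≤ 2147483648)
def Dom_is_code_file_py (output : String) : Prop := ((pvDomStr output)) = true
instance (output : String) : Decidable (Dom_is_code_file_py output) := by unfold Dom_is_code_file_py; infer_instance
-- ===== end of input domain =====

-- B: one left-to-right scan testing at each position whether any indicator starts there,
-- instead of A's seven independent substring-containment scans. Same value on every input.

-- ===== PORT A =====
-- the literal indicator list of A
def pvIndicators : List String :=
  ["def ", "class ", "import ", "from ", "function ", "const ", "=>"]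

def is_code_file_py (output : String) : Bool :=
  let output_lower := PySem.Str.lower output
  pvIndicators.any (fun indicator => PySem.Str.isIn indicator output_lower)

-- ===== PORT B =====
-- the scan: at each suffix, does any indicator start here?
def pvScan (inds : List (List Char)) : List Char → Bool
  | [] => false
  | c :: rest =>
      (inds.any (fun p => PySem.Chars.startswith (c :: rest) p)) || pvScan inds rest

def is_code_file_py_alt (output : String) : Bool :=
  pvScan (pvIndicators.map String.toList) (PySem.Chars.lower output.toList)

-- ===== PRECONDITION & SPEC =====
def Spec_is_code_file_py (output : String) (out : Bool) : Prop := out = is_code_file_py_alt output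
instance (output : String) (out : Bool) : Decidable (Spec_is_code_file_py output out) := by unfold Spec_is_code_file_py; infer_instance

-- ===== CLAIM (what is proved, stated in full; the proofs are below) =====
def Claim_equal_is_code_file_py : Prop := ∀ (output : String), Dom_is_code_file_py output → Spec_is_code_file_py output (is_code_file_py output)

-- ===== LEMMAS AND PROOFS =====

-- ===== VERDICT (by name: the statement is the Claim_ definition above) =====
lemma pvScan_eq_any_isIn (inds : List (List Char)) (h : ∀ p ∈ inds, p ≠ []) :
    ∀ l : List Char, pvScan inds l = inds.any (fun p => PySem.Chars.isIn p l) := by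
  intro l
  induction l with
  | nil =>
      simp only [pvScan]
      symm
      simp only [List.any_eq_false]
      intro p hp
      have := h p hp
      simp [PySem.Chars.isIn_eq_false_iff, List.infix_nil]
      intro hinf
      exact this hinf
  | cons c rest ih =>
      simp only [pvScan, ih]
      rw [Bool.eq_iff_iff]
      simp only [Bool.or_eq_true, List.any_eq_true, PySem.Chars.startswith_iff,
        PySem.Chars.isIn_iff_infix, List.infix_cons_iff]
      aesop

theorem is_code_file_py_spec : Claim_equal_is_code_file_py := by
  intro output _
  unfold Spec_is_code_file_py is_code_file_py is_code_file_py_alt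
  rw [pvScan_eq_any_isIn]
  · simp [pvIndicators, PySem.Str.isIn, PySem.Str.lower]
  · intro p hp
    simp [pvIndicators] at hp
    rcases hp with h|h|h|h|h|h|h <;> subst h <;> decide
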